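-- pv_equiv track=rewrite | github.com/zacharytroberts03-ctrl/UFC5.2 | tools/scrape_ufc_fighter.py | count_win_methods
-- ===== SOURCE A (Python) =====
-- def count_win_methods(fight_history: list[dict]) -> dict:
--     """Count wins by method from the parsed fight history."""
--     ko = sub = dec = 0
--     for f in fight_history:
--         if f["result"] != "WIN":
--             continue
--         method = f.get("method", "").upper()
--         if "KO" in method or "TKO" in method:
--             ko += 1
--         elif "SUB" in method:
--             sub += 1
--         elif "DEC" in method:
--             dec += 1
--     label = f"(last {len(fight_history)} fights)"
--     return {
--         "ko":  str(ko),
--         "sub": str(sub),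
--         "dec": str(dec),
--         "note": f"Counted from {label}",
--     }
-- ===== SOURCE B (Python) =====
-- def count_win_methods(fight_history: list[dict]) -> dict:
--     """Count wins by method from the parsed fight history."""
--     wins = [f.get("method", "").upper() for f in fight_history if f["result"] == "WIN"]
--     ko = len([m for m in wins if "KO" in m])
--     sub = len([m for m in wins if "SUB" in m and "KO" not in m])
--     dec = len([m for m in wins if "DEC" in m and "SUB" not in m and "KO" not in m])
--     return {
--         "ko":  str(ko),
--         "sub": str(sub),
--         "dec": str(dec),
--         "note": f"Counted from (last {len(fight_history)} fights)",
--     }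
-- ===== Notes on version B (the rewrite author's own statement) =====
-- stated objective: alternative
-- what changed: Replaces the single accumulator loop with an if/elif priority chain by a filtered wins projection plus three independent filter-count passes whose predicates encode the elif exclusion (SUB excludes KO, DEC excludes KO and SUB; 'TKO in m' is dropped as it is subsumed by 'KO in m').
import Mathlib
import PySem

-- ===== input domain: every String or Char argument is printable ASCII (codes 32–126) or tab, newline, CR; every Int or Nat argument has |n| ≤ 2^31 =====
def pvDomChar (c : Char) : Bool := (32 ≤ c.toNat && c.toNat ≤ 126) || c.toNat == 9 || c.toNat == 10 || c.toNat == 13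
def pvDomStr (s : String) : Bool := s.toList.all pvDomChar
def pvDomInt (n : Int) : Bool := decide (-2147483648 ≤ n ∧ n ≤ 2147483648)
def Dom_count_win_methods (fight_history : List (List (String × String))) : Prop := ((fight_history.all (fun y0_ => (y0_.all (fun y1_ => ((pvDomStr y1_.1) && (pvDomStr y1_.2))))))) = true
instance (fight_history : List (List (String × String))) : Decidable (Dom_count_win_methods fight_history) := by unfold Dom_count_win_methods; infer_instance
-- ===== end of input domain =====

-- B replaces A's single loop with an if/elif chain by three independent filter-count
-- passes over the WIN methods (objective: alternative decomposition, same cost).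

-- ===== PORT A =====
-- one loop, accumulator (ko, sub, dec); f["result"] ported as get? with "" default
-- (Python raises KeyError on a missing "result" key: excluded by Pre_ below)
def cwmStepA (st : Int × Int × Int) (f : List (String × String)) : Int × Int × Int :=
  if ((PySem.Dict.mk f).get? "result").getD "" ≠ "WIN" then st
  else
    let method := PySem.Str.upper (((PySem.Dict.mk f).get? "method").getD "")
    if PySem.Str.isIn "KO" method || PySem.Str.isIn "TKO" method then (st.1 + 1, st.2.1, st.2.2)
    else if PySem.Str.isIn "SUB" method then (st.1, st.2.1 + 1, st.2.2)
    else if PySem.Str.isIn "DEC" method then (st.1, st.2.1, st.2.2 + 1)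
    else st

def count_win_methods (fight_history : List (List (String × String))) : List (String × String) :=
  let st := fight_history.foldl cwmStepA (0, 0, 0)
  let label := "(last " ++ PySem.Int.toStr (fight_history.length : Int) ++ " fights)"
  [("ko", PySem.Int.toStr st.1), ("sub", PySem.Int.toStr st.2.1),
   ("dec", PySem.Int.toStr st.2.2), ("note", "Counted from " ++ label)]

-- ===== PORT B =====
-- filtered projection of WIN methods, then three filter-count passes
def cwmWins (fight_history : List (List (String × String))) : List String :=
  (fight_history.filter
      (fun f => ((PySem.Dict.mk f).get? "result").getD "" == "WIN")).map
    (fun f => PySem.Str.upper (((PySem.Dict.mk f).get? "method").getD ""))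

def count_win_methods_alt (fight_history : List (List (String × String))) : List (String × String) :=
  let wins := cwmWins fight_history
  let ko : Int := (wins.filter (fun m => PySem.Str.isIn "KO" m)).length
  let sub : Int := (wins.filter (fun m => PySem.Str.isIn "SUB" m && !PySem.Str.isIn "KO" m)).length
  let dec : Int := (wins.filter
      (fun m => PySem.Str.isIn "DEC" m && !PySem.Str.isIn "SUB" m && !PySem.Str.isIn "KO" m)).length
  [("ko", PySem.Int.toStr ko), ("sub", PySem.Int.toStr sub), ("dec", PySem.Int.toStr dec),
   ("note", "Counted from (last " ++ PySem.Int.toStr (fight_history.length : Int) ++ " fights)")]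

-- ===== PRECONDITION & SPEC =====
-- Pre_ excludes fights without a "result" key, on which Python A (and B) raise KeyError
def Pre_count_win_methods (fight_history : List (List (String × String))) : Prop :=
  ∀ f ∈ fight_history, (PySem.Dict.mk f).contains "result" = true
instance (fight_history : List (List (String × String))) : Decidable (Pre_count_win_methods fight_history) := by unfold Pre_count_win_methods; infer_instance

def pvWitness_count_win_methods : (List (List (String × String))) :=
  [[("result", "WIN"), ("method", "KO")], [("result", "LOSS"), ("method", "SUB")]]

def Spec_count_win_methods (fight_history : List (List (String × String))) (out : List (String × String)) : Prop := out = count_win_methods_alt fight_history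
instance (fight_history : List (List (String × String))) (out : List (String × String)) : Decidable (Spec_count_win_methods fight_history out) := by unfold Spec_count_win_methods; infer_instance

-- ===== CLAIM (what is proved, stated in full; the proofs are below) =====
def Claim_equal_count_win_methods : Prop := ∀ (fight_history : List (List (String × String))), Dom_count_win_methods fight_history → Pre_count_win_methods fight_history → Spec_count_win_methods fight_history (count_win_methods fight_history)

-- ===== LEMMAS AND PROOFS =====

-- "TKO" in m implies "KO" in m, so A's disjunction collapses to B's single test
lemma cwm_tko_ko (m : String) :
    (PySem.Str.isIn "KO" m || PySem.Str.isIn "TKO" m) = PySem.Str.isIn "KO" m := by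
  cases h : PySem.Str.isIn "KO" m with
  | true => simp
  | false =>
    simp only [Bool.false_or]
    cases h2 : PySem.Str.isIn "TKO" m with
    | false => rfl
    | true =>
      exfalso
      simp only [PySem.Str.isIn_eq] at h h2
      rw [PySem.Chars.isIn_iff_infix] at h2
      rw [PySem.Chars.isIn_eq_false_iff] at h
      exact h (List.IsInfix.trans (l₂ := "TKO".toList) ⟨['T'], [], rfl⟩ h2)

-- loop invariant: the fold adds B's three counts to the accumulator
lemma cwm_loop (fh : List (List (String × String))) (a b c : Int) :
    fh.foldl cwmStepA (a, b, c) =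
      (a + ((cwmWins fh).filter (fun m => PySem.Str.isIn "KO" m)).length,
       b + ((cwmWins fh).filter (fun m => PySem.Str.isIn "SUB" m && !PySem.Str.isIn "KO" m)).length,
       c + ((cwmWins fh).filter
          (fun m => PySem.Str.isIn "DEC" m && !PySem.Str.isIn "SUB" m && !PySem.Str.isIn "KO" m)).length) := by
  induction fh generalizing a b c with
  | nil => simp [cwmWins]
  | cons f t ih =>
    simp only [List.foldl_cons, cwmStepA, cwmWins, List.filter_cons]
    by_cases hr : ((PySem.Dict.mk f).get? "result").getD "" = "WIN"
    · simp only [hr, if_pos, beq_self_eq_true, ne_eq, not_true_eq_false, if_false,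
        List.map_cons, List.filter_cons]
      rw [cwm_tko_ko]
      set m := PySem.Str.upper (((PySem.Dict.mk f).get? "method").getD "") with hm
      by_cases hko : PySem.Str.isIn "KO" m = true
      · simp only [hko, if_true, Bool.not_true, Bool.and_false, ih, cwmWins,
          List.length_cons]
        push_cast; ring_nf
      · simp only [Bool.not_eq_true] at hko
        simp only [hko, Bool.false_eq_true, if_false, Bool.not_false, Bool.and_true]
        by_cases hsub : PySem.Str.isIn "SUB" m = true
        · simp only [hsub, if_true, Bool.not_true, Bool.and_false, if_false, ih, cwmWins,
            List.length_cons]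
          push_cast; ring_nf
        · simp only [Bool.not_eq_true] at hsub
          simp only [hsub, Bool.false_eq_true, if_false, Bool.not_false, Bool.and_true]
          by_cases hdec : PySem.Str.isIn "DEC" m = true
          · simp only [hdec, if_true, ih, cwmWins, List.length_cons]
            push_cast; ring_nf
          · simp only [Bool.not_eq_true] at hdec
            have hdec' : PySem.Chars.isIn ['D', 'E', 'C'] m.toList = false := by
              simpa using hdec
            simp [hdec', ih, cwmWins]
    · have : (((PySem.Dict.mk f).get? "result").getD "" == "WIN") = false := by
        simpa using hr
      simp [hr, this, ih, cwmWins]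

-- ===== VERDICT (by name: the statement is the Claim_ definition above) =====
theorem count_win_methods_spec : Claim_equal_count_win_methods := by
  intro fh _ _
  show _ = _
  simp only [count_win_methods, count_win_methods_alt, cwm_loop, zero_add]
  rw [show ("Counted from " ++ ("(last " ++ PySem.Int.toStr (fh.length : Int) ++ " fights)")) =
      "Counted from (last " ++ PySem.Int.toStr (fh.length : Int) ++ " fights)" by
    simp [← String.append_assoc]]
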